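-- pv_equiv track=rewrite | github.com/MarkMLCode/Dungeons-and-Zero | src/ai/dnd_server.py | find_lowest_no_upcast_slot
-- ===== SOURCE A (Python) =====
-- def find_lowest_no_upcast_slot(spell_slots):
--     for i in range(len(spell_slots)):
--         if spell_slots[i] == 0:
--             no_higher_slots = True
--             for j in range(i + 1, len(spell_slots)):
--                 if spell_slots[j] > 0:
--                     no_higher_slots = False
--                     break
--             if no_higher_slots:
--                 return i + 1
--     return None
-- ===== SOURCE B (Python) =====
-- def find_lowest_no_upcast_slot(spell_slots):
--     # One backward pass: remember whether a positive slot exists to the right;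
--     # the last zero recorded with no positive after it is the lowest such slot.
--     best = None
--     seen_positive = False
--     for i in range(len(spell_slots) - 1, -1, -1):
--         v = spell_slots[i]
--         if v > 0:
--             seen_positive = True
--         elif v == 0 and not seen_positive:
--             best = i + 1
--     return best
-- ===== Notes on version B (the rewrite author's own statement) =====
-- stated objective: alternative
-- what changed: Replaces A's nested loops (for each zero slot, scan the rest of the list for a positive slot) with a single backward pass that tracks whether a positive slot has been seen and keeps the leftmost qualifying zero.
import Mathlib
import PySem

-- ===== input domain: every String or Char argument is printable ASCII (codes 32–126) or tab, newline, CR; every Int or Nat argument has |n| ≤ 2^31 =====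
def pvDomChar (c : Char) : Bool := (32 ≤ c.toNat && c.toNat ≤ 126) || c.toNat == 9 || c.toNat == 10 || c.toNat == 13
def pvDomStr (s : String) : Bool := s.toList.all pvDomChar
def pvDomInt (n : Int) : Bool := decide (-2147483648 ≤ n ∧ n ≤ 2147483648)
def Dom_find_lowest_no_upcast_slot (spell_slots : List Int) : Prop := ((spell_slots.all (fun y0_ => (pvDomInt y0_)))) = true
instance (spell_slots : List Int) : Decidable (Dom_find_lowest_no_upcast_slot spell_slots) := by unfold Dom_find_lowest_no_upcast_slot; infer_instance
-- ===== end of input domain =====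

-- B replaces A's zero-then-scan-ahead nested loops with a single backward pass
-- tracking whether a positive slot has been seen (objective: alternative).


-- ===== PORT A =====
-- inner loop: for j in range(i+1, len): if spell_slots[j] > 0: no_higher_slots = False; break
def findA_inner (spell_slots : List Int) : List Int → Bool
  | [] => true
  | j :: rest =>
    match PySem.List.pyGet? spell_slots j with
    | none => true  -- unreachable: j is always in range
    | some v => if 0 < v then false else findA_inner spell_slots rest

-- outer loop: for i in range(len(spell_slots)): …
def findA_outer (spell_slots : List Int) : List Int → Option Int
  | [] => none
  | i :: rest =>
    match PySem.List.pyGet? spell_slots i with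
    | none => none  -- unreachable: i is always in range
    | some v =>
      if v = 0 then
        if findA_inner spell_slots (PySem.List.pyRange (i + 1) (spell_slots.length : Int) 1) then
          some (i + 1)
        else
          findA_outer spell_slots rest
      else
        findA_outer spell_slots rest

def find_lowest_no_upcast_slot (spell_slots : List Int) : Option Int :=
  findA_outer spell_slots (PySem.List.pyRange 0 (spell_slots.length : Int) 1)

-- ===== PORT B =====
-- backward loop: for i in range(len-1, -1, -1): … ; state = (seen_positive, best), index offset k
def bGo : List Int → Int → Bool × Option Int
  | [], _ => (false, none)
  | x :: rest, k =>
    let r := bGo rest (k + 1)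
    if 0 < x then (true, r.2)
    else if x = 0 ∧ r.1 = false then (r.1, some (k + 1))
    else r

def find_lowest_no_upcast_slot_alt (spell_slots : List Int) : Option Int :=
  (bGo spell_slots 0).2

-- ===== PRECONDITION & SPEC =====
def Spec_find_lowest_no_upcast_slot (spell_slots : List Int) (out : Option Int) : Prop := out = find_lowest_no_upcast_slot_alt spell_slots
instance (spell_slots : List Int) (out : Option Int) : Decidable (Spec_find_lowest_no_upcast_slot spell_slots out) := by unfold Spec_find_lowest_no_upcast_slot; infer_instance

-- ===== CLAIM (what is proved, stated in full; the proofs are below) =====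
def Claim_equal_find_lowest_no_upcast_slot : Prop := ∀ (spell_slots : List Int), Dom_find_lowest_no_upcast_slot spell_slots → Spec_find_lowest_no_upcast_slot spell_slots (find_lowest_no_upcast_slot spell_slots)

-- ===== LEMMAS AND PROOFS =====

-- abstract form of A's outer loop on the suffix, with the inner scan replaced by its value
def gA : List Int → Int → Option Int
  | [], _ => none
  | x :: rest, k =>
    if x = 0 then
      if rest.all (fun v => decide (v ≤ 0)) then some (k + 1) else gA rest (k + 1)
    else gA rest (k + 1)

lemma inner_eq (pre suf : List Int) :
    findA_inner (pre ++ suf) (PySem.List.pyRange (pre.length : Int) (((pre ++ suf).length : Nat) : Int) 1)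
      = suf.all (fun v => decide (v ≤ 0)) := by
  induction suf generalizing pre with
  | nil =>
    rw [PySem.List.pyRange_one_eq_nil (by simp)]
    simp [findA_inner]
  | cons x suf ih =>
    rw [PySem.List.pyRange_one_cons (by simp)]
    rw [findA_inner]
    rw [PySem.List.pyGet?_append_length]
    by_cases hx : 0 < x
    · simp [hx, List.all_cons, show ¬ x ≤ 0 by omega]
    · have h1 : ((pre.length : Int) + 1) = (((pre ++ [x]).length : Nat) : Int) := by simp
      have h2 : pre ++ x :: suf = (pre ++ [x]) ++ suf := by simp
      simp only [hx, if_false]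
      rw [h2, h1]
      rw [ih (pre ++ [x])]
      simp [List.all_cons, show x ≤ 0 by omega]

lemma outer_eq (pre suf : List Int) :
    findA_outer (pre ++ suf) (PySem.List.pyRange (pre.length : Int) (((pre ++ suf).length : Nat) : Int) 1)
      = gA suf (pre.length : Int) := by
  induction suf generalizing pre with
  | nil =>
    rw [PySem.List.pyRange_one_eq_nil (by simp)]
    simp [findA_outer, gA]
  | cons x suf ih =>
    rw [PySem.List.pyRange_one_cons (by simp)]
    rw [findA_outer]
    rw [PySem.List.pyGet?_append_length]
    have h1 : ((pre.length : Int) + 1) = (((pre ++ [x]).length : Nat) : Int) := by simp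
    have h2 : pre ++ x :: suf = (pre ++ [x]) ++ suf := by simp
    by_cases hx : x = 0
    · subst hx
      rw [show pre ++ (0:Int) :: suf = (pre ++ [(0:Int)]) ++ suf by simp, h1,
          inner_eq (pre ++ [(0:Int)]) suf]
      by_cases hall : suf.all (fun v => decide (v ≤ 0))
      · simp [gA, hall]
      · simp [gA, hall]
        simpa using ih (pre ++ [(0:Int)])
    · simp only [hx, if_false]
      rw [h2, h1, ih (pre ++ [x])]
      simp [gA, hx]

lemma bGo_fst (xs : List Int) (k : Int) :
    (bGo xs k).1 = xs.any (fun v => decide (0 < v)) := by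
  induction xs generalizing k with
  | nil => simp [bGo]
  | cons x rest ih =>
    rw [bGo]
    by_cases hx : 0 < x
    · simp [hx]
    · rw [if_neg hx]
      by_cases hz : x = 0 ∧ (bGo rest (k + 1)).1 = false
      · rw [if_pos hz]
        have h := (ih (k + 1)).symm
        rw [hz.2] at h
        simp [hx, h, hz.2]
      · rw [if_neg hz]
        simp [hx, ih]

lemma all_le_eq_not_any_pos (xs : List Int) :
    xs.all (fun v => decide (v ≤ 0)) = ! xs.any (fun v => decide (0 < v)) := by
  induction xs with
  | nil => simp
  | cons x rest ih =>
    simp only [List.all_cons, List.any_cons, Bool.not_or, ih]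
    congr 1
    by_cases h : x ≤ 0
    · simp [h, show ¬ 0 < x by omega]
    · simp [h, show 0 < x by omega]

lemma gA_eq_bGo (xs : List Int) (k : Int) : gA xs k = (bGo xs k).2 := by
  induction xs generalizing k with
  | nil => simp [gA, bGo]
  | cons x rest ih =>
    rw [gA, bGo]
    by_cases hx : 0 < x
    · simp [show x ≠ 0 by omega, hx, ih]
    · by_cases hz : x = 0
      · have : rest.all (fun v => decide (v ≤ 0)) = !(bGo rest (k + 1)).1 := by
          rw [bGo_fst, all_le_eq_not_any_pos]
        by_cases hsp : (bGo rest (k + 1)).1 = false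
        · simp [hz, hsp, this]
        · simp only [hz]
          rw [this]
          simp only [Bool.not_eq_false] at hsp
          simp [hsp, ih]
      · simp [hz, hx, ih]

-- ===== VERDICT (by name: the statement is the Claim_ definition above) =====
theorem find_lowest_no_upcast_slot_spec : Claim_equal_find_lowest_no_upcast_slot := by
  intro xs _
  unfold Spec_find_lowest_no_upcast_slot find_lowest_no_upcast_slot find_lowest_no_upcast_slot_alt
  have h := outer_eq [] xs
  simp only [List.nil_append, List.length_nil, Nat.cast_zero] at h
  rw [h, gA_eq_bGo]
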